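-- pv_equiv track=rewrite | github.com/KAMWay/geekhub-python-2023 | HT_08/task_6.py | words_len_iterator_2
-- ===== SOURCE A (Python) =====
-- def words_len_iterator_2(str_value: str) -> iter:
--     _count = 0
--     for ch in str_value:
--         if ch == ' ':
--             if _count > 0:
--                 yield _count
--             _count = 0
--         else:
--             _count += 1
--
--     if _count > 0:
--         yield _count
-- ===== SOURCE B (Python) =====
-- def words_len_iterator_2(str_value: str) -> iter:
--     for word in str_value.split(' '):
--         if word:
--             yield len(word)
-- ===== Notes on version B (the rewrite author's own statement) =====
-- stated objective: idiomatic
-- what changed: Replaces the hand-rolled per-character run-length counter with single-space tokenization via str.split followed by yielding the length of each non-empty token.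
import Mathlib
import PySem

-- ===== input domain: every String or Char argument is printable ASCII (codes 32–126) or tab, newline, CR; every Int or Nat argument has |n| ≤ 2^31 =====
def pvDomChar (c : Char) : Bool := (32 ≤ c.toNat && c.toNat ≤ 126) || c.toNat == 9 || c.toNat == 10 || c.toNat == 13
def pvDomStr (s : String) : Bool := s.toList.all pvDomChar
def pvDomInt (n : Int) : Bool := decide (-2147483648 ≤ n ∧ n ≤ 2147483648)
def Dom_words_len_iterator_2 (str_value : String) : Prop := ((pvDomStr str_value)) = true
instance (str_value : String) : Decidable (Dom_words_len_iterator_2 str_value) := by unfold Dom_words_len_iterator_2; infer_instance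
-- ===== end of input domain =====

-- ===== PORT A =====
-- A scans character by character, maintaining a run length _count, emitting it at each space / at the end.
def words_len_iterator_2 (str_value : String) : List Int :=
  let r := str_value.toList.foldl
    (fun (st : Int × List Int) ch =>
      if ch = ' ' then
        (0, if st.1 > 0 then st.2 ++ [st.1] else st.2)
      else
        (st.1 + 1, st.2))
    (0, [])
  if r.1 > 0 then r.2 ++ [r.1] else r.2

-- ===== PORT B =====
-- B: idiomatic rewrite — tokenize on the single-space separator with str.split, then yield each non-empty token's length.
def words_len_iterator_2_alt (str_value : String) : List Int :=
  (PySem.Chars.splitOn str_value.toList " ".toList).foldl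
    (fun acc w => if w ≠ [] then acc ++ [(w.length : Int)] else acc) []

-- ===== PRECONDITION & SPEC =====
def Spec_words_len_iterator_2 (str_value : String) (out : List Int) : Prop := out = words_len_iterator_2_alt str_value
instance (str_value : String) (out : List Int) : Decidable (Spec_words_len_iterator_2 str_value out) := by unfold Spec_words_len_iterator_2; infer_instance

-- ===== CLAIM (what is proved, stated in full; the proofs are below) =====
def Claim_equal_words_len_iterator_2 : Prop := ∀ (str_value : String), Dom_words_len_iterator_2 str_value → Spec_words_len_iterator_2 str_value (words_len_iterator_2 str_value)

-- ===== LEMMAS AND PROOFS =====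

-- reference single-char split used to bridge the two ports
def pvSplitSp : List Char → List Char → List (List Char)
  | [], cur => [cur.reverse]
  | c :: rest, cur =>
    if c = ' ' then cur.reverse :: pvSplitSp rest [] else pvSplitSp rest (c :: cur)

lemma pvGo_eq_splitSp : ∀ (fuel : Nat) (l cur : List Char) (acc : List (List Char)),
    l.length < fuel →
    PySem.Chars.splitOn.go [' '] fuel l cur acc = acc.reverse ++ pvSplitSp l cur := by
  intro fuel
  induction fuel with
  | zero => intro l cur acc h; omega
  | succ fuel ih =>
    intro l cur acc h
    cases l with
    | nil => simp [PySem.Chars.splitOn.go, pvSplitSp]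
    | cons c rest =>
      by_cases hc : c = ' '
      · subst hc
        have hp : List.isPrefixOf [' '] (' ' :: rest) = true := by
          simp [List.isPrefixOf]
        simp only [PySem.Chars.splitOn.go, hp, pvSplitSp, ite_true, List.length_cons,
          List.drop_succ_cons, List.length_nil, List.drop_zero]
        rw [ih rest [] (List.reverse cur :: acc) (by simp at h ⊢; omega)]
        simp
      · have hp : List.isPrefixOf [' '] (c :: rest) = false := by
          simp [List.isPrefixOf]; intro h'; exact absurd h'.symm hc
        simp only [PySem.Chars.splitOn.go, hp, Bool.false_eq_true, if_false, pvSplitSp,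
          if_neg hc]
        exact ih rest (c :: cur) acc (by simp at h ⊢; omega)

lemma pvSplitOn_eq (l : List Char) :
    PySem.Chars.splitOn l [' '] = pvSplitSp l [] := by
  have := pvGo_eq_splitSp (l.length + 1) l [] [] (by omega)
  simpa [PySem.Chars.splitOn] using this

lemma pvMain : ∀ (l cur : List Char) (acc : List Int),
    (let r := l.foldl
        (fun (st : Int × List Int) ch =>
          if ch = ' ' then (0, if st.1 > 0 then st.2 ++ [st.1] else st.2)
          else (st.1 + 1, st.2))
        ((cur.length : Int), acc)
     ; if r.1 > 0 then r.2 ++ [r.1] else r.2)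
    = (pvSplitSp l cur).foldl
        (fun acc w => if w ≠ [] then acc ++ [(w.length : Int)] else acc) acc := by
  intro l
  induction l with
  | nil =>
    intro cur acc
    cases cur with
    | nil => simp [pvSplitSp]
    | cons c cs => simp [pvSplitSp]
  | cons c rest ih =>
    intro cur acc
    by_cases hc : c = ' '
    · subst hc
      simp only [pvSplitSp, List.foldl_cons, ite_true, if_true]
      have hacc : (if (cur.length : Int) > 0 then acc ++ [(cur.length : Int)] else acc)
          = (if cur.reverse ≠ [] then acc ++ [(cur.reverse.length : Int)] else acc) := by
        cases cur with
        | nil => simp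
        | cons x xs => simp
      rw [hacc]
      have := ih [] (if cur.reverse ≠ [] then acc ++ [(cur.reverse.length : Int)] else acc)
      simpa using this
    · simp only [pvSplitSp, if_neg hc, List.foldl_cons]
      have := ih (c :: cur) acc
      simp only [List.length_cons] at this
      push_cast at this ⊢
      simpa using this

-- ===== VERDICT (by name: the statement is the Claim_ definition above) =====
theorem words_len_iterator_2_spec : Claim_equal_words_len_iterator_2 := by
  intro s _
  unfold Spec_words_len_iterator_2 words_len_iterator_2 words_len_iterator_2_alt
  rw [show (" ".toList) = [' '] from rfl, pvSplitOn_eq]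
  have := pvMain s.toList [] []
  simpa using this
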